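-- pv_equiv track=rewrite | github.com/amandamurphy2025/projects | CMSC_14100/homework_3.py | intercalate_lists
-- ===== SOURCE A (Python) =====
-- def intercalate_lists(lst1, lst2):
--     """
--     intercalate_list takes in two lists and returns a NEW list that
--     alternates the elements of the input lists. For each pair of elements
--     between lst1 and lst2 in the same index position, the element from lst1
--     should appear first in the new list. If the lists are not of the same
--     length, the function should repeat the last element of the shorter list.
--
--     Inputs:
--         lst1 (list): a list of elements
--         lst2 (list): a list of elements
--
--     Returns (list): a new list with the elements of lst2 inserted
--     between the elements of lst1
--
--     """
--     # Do not remove the two assertions. They help verify that the lists are not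
--     # empty
--     assert len(lst1) > 0
--     assert len(lst2) > 0
--
--     result = None
--
--     reno_lst1 = []
--     reno_lst1.extend(lst1)
--
--     reno_lst2 = []
--     reno_lst2.extend(lst2)
--
--     new_lst = []
--
--     while len(reno_lst1) < len(lst2):
--         reno_lst1.append(lst1[-1])
--
--     while len(reno_lst2) < len(lst1):
--         reno_lst2.append(lst2[-1])
--
--     for _, val in enumerate(zip(reno_lst1, reno_lst2)):
--         new_lst.extend(val)
--
--     result = new_lst
--
--     return result
-- ===== SOURCE B (Python) =====
-- def intercalate_lists(lst1, lst2):
--     assert len(lst1) > 0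
--     assert len(lst2) > 0
--     n, m = len(lst1), len(lst2)
--     mx = n if n > m else m
--     out = [None] * (2 * mx)
--     out[0:2 * n:2] = lst1
--     out[2 * n::2] = [lst1[-1]] * (mx - n)
--     out[1:2 * m:2] = lst2
--     out[2 * m + 1::2] = [lst2[-1]] * (mx - m)
--     return out
-- ===== Notes on version B (the rewrite author's own statement) =====
-- stated objective: faster
-- what changed: Instead of padding two copies of the inputs with while-loops and then zip+extend, B pre-allocates the 2*max(n,m) output once and fills it column-wise with four strided slice assignments (lst1 into even slots, lst2 into odd slots, each padding block as a repeated-element slice), with no per-element Python loop and no padded input copies.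
import Mathlib
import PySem

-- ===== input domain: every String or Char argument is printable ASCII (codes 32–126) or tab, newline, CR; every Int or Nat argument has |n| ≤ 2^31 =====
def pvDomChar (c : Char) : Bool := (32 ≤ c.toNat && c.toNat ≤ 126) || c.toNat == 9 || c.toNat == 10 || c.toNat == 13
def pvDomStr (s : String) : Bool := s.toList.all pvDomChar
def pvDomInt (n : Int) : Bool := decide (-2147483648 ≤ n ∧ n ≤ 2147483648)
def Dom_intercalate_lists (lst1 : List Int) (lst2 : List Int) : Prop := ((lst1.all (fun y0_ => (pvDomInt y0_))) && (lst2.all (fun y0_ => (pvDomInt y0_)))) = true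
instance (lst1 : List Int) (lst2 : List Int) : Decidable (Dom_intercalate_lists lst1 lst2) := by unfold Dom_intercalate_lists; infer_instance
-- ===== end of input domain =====

-- ===== PORT A =====
-- B pre-allocates the output and fills even/odd positions by strided slice assignment,
-- replacing A's two padding while-loops plus zip+extend (objective: faster, constant factor).

-- while len(cur) < target: cur.append(x)
def padTo (cur : List Int) (target : Nat) (x : Int) : List Int :=
  if cur.length < target then padTo (cur ++ [x]) target x else cur
termination_by target - cur.length
decreasing_by simp_all; omega

def intercalate_lists (lst1 : List Int) (lst2 : List Int) : List Int :=
  -- lst1[-1] / lst2[-1]: exact via getLast! since Pre_ gives nonempty lists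
  let reno_lst1 := ([] : List Int) ++ lst1
  let reno_lst2 := ([] : List Int) ++ lst2
  let reno_lst1 := padTo reno_lst1 lst2.length lst1.getLast!
  let reno_lst2 := padTo reno_lst2 lst1.length lst2.getLast!
  (reno_lst1.zip reno_lst2).foldl (fun new_lst val => new_lst ++ [val.1, val.2]) []

-- ===== PORT B =====
-- out[start::2] = vals : strided slice assignment, one List.set per assigned slot
def assignStride2 : List Int → Nat → List Int → List Int
  | out, _, [] => out
  | out, s, v :: vs => assignStride2 (out.set s v) (s + 2) vs

def intercalate_lists_alt (lst1 : List Int) (lst2 : List Int) : List Int :=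
  let n := lst1.length
  let m := lst2.length
  let mx := if n > m then n else m
  -- [None] * (2*mx): every slot is overwritten below, so the placeholder 0 never survives
  let out := List.replicate (2 * mx) 0
  let out := assignStride2 out 0 lst1                                      -- out[0:2n:2] = lst1
  let out := assignStride2 out (2 * n) (List.replicate (mx - n) lst1.getLast!) -- out[2n::2] = [lst1[-1]]*(mx-n)
  let out := assignStride2 out 1 lst2                                      -- out[1:2m:2] = lst2
  let out := assignStride2 out (2 * m + 1) (List.replicate (mx - m) lst2.getLast!) -- out[2m+1::2] = [lst2[-1]]*(mx-m)
  out

-- ===== PRECONDITION & SPEC =====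
-- A asserts both lists nonempty (AssertionError otherwise); Pre_ excludes exactly that.
def Pre_intercalate_lists (lst1 : List Int) (lst2 : List Int) : Prop := lst1 ≠ [] ∧ lst2 ≠ []
instance (lst1 : List Int) (lst2 : List Int) : Decidable (Pre_intercalate_lists lst1 lst2) := by
  unfold Pre_intercalate_lists; infer_instance
def pvWitness_intercalate_lists : List Int × List Int := ([1, 2, 3], [4, 5])
def Spec_intercalate_lists (lst1 : List Int) (lst2 : List Int) (out : List Int) : Prop := out = intercalate_lists_alt lst1 lst2
instance (lst1 : List Int) (lst2 : List Int) (out : List Int) : Decidable (Spec_intercalate_lists lst1 lst2 out) := by unfold Spec_intercalate_lists; infer_instance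

-- ===== CLAIM (what is proved, stated in full; the proofs are below) =====
def Claim_equal_intercalate_lists : Prop := ∀ (lst1 : List Int) (lst2 : List Int), Dom_intercalate_lists lst1 lst2 → Pre_intercalate_lists lst1 lst2 → Spec_intercalate_lists lst1 lst2 (intercalate_lists lst1 lst2)

-- ===== LEMMAS AND PROOFS =====

-- canonical interleaving of two equal-length lists, used only in the proofs
def interleave : List Int → List Int → List Int
  | x :: xs, y :: ys => x :: y :: interleave xs ys
  | _, _ => []

theorem padTo_eq (cur : List Int) (target : Nat) (x : Int) :
    padTo cur target x = cur ++ List.replicate (target - cur.length) x := by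
  rw [padTo]
  split
  · rename_i h
    rw [padTo_eq (cur ++ [x]) target x]
    have : target - cur.length = (target - (cur ++ [x]).length) + 1 := by simp; omega
    rw [this, List.replicate_succ, List.append_assoc]
    simp
  · rename_i h
    have : target - cur.length = 0 := by omega
    simp [this]
termination_by target - cur.length
decreasing_by simp; omega

theorem zipflat_eq_interleave (l1 l2 : List Int) (acc : List Int) :
    (l1.zip l2).foldl (fun a p => a ++ [p.1, p.2]) acc = acc ++ interleave l1 l2 := by
  induction l1 generalizing l2 acc with
  | nil => simp [interleave]
  | cons x xs ih =>
      cases l2 with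
      | nil => simp [interleave]
      | cons y ys => simp [interleave, ih, List.append_assoc]

theorem interleave_length (l1 l2 : List Int) (h : l1.length = l2.length) :
    (interleave l1 l2).length = 2 * l1.length := by
  induction l1 generalizing l2 with
  | nil => cases l2 <;> simp_all [interleave]
  | cons x xs ih =>
      cases l2 with
      | nil => simp_all
      | cons y ys =>
          simp only [interleave, List.length_cons]
          rw [ih ys (by simpa using h)]
          omega

theorem interleave_getD (l1 l2 : List Int) (i : Nat) (h : l1.length = l2.length) :
    (interleave l1 l2).getD i 0 =
      if i % 2 = 0 then l1.getD (i / 2) 0 else l2.getD (i / 2) 0 := by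
  induction l1 generalizing l2 i with
  | nil => cases l2 <;> simp_all [interleave]
  | cons x xs ih =>
      cases l2 with
      | nil => simp_all
      | cons y ys =>
          match i with
          | 0 => simp [interleave]
          | 1 => simp [interleave]
          | (k + 2) =>
              simp only [interleave, List.getD_cons_succ]
              rw [ih ys k (by simpa using h)]
              have h2 : (k + 2) % 2 = k % 2 := by omega
              have h3 : (k + 2) / 2 = k / 2 + 1 := by omega
              rw [h2, h3]
              split <;> simp

theorem assignStride2_length (vs out : List Int) (s : Nat) :
    (assignStride2 out s vs).length = out.length := by
  induction vs generalizing out s with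
  | nil => simp [assignStride2]
  | cons v vs ih => simp [assignStride2, ih]

theorem assignStride2_getD (vs out : List Int) (s i : Nat)
    (hlen : s + 2 * vs.length ≤ out.length + 1) :
    (assignStride2 out s vs).getD i 0 =
      if s ≤ i ∧ (i - s) % 2 = 0 ∧ (i - s) / 2 < vs.length then vs.getD ((i - s) / 2) 0
      else out.getD i 0 := by
  induction vs generalizing out s with
  | nil => simp [assignStride2]
  | cons v vs ih =>
      simp only [assignStride2]
      rw [ih (out.set s v) (s + 2) (by simp at hlen ⊢; omega)]
      by_cases hc : s + 2 ≤ i ∧ (i - (s + 2)) % 2 = 0 ∧ (i - (s + 2)) / 2 < vs.length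
      · rw [if_pos hc]
        have hc2 : s ≤ i ∧ (i - s) % 2 = 0 ∧ (i - s) / 2 < (v :: vs).length := by
          simp only [List.length_cons]; omega
        rw [if_pos hc2]
        have : (i - s) / 2 = (i - (s + 2)) / 2 + 1 := by omega
        rw [this, List.getD_cons_succ]
      · rw [if_neg hc]
        by_cases hi : i = s
        · have hc2 : s ≤ i ∧ (i - s) % 2 = 0 ∧ (i - s) / 2 < (v :: vs).length := by
            simp [hi]
          rw [if_pos hc2]
          have hz : (i - s) / 2 = 0 := by omega
          rw [hz, List.getD_cons_zero]
          have hs : s < out.length := by simp at hlen; omega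
          rw [List.getD_eq_getElem?_getD, hi, List.getElem?_set_self (by omega)]
          simp
        · have hc2 : ¬ (s ≤ i ∧ (i - s) % 2 = 0 ∧ (i - s) / 2 < (v :: vs).length) := by
            simp only [List.length_cons]; omega
          rw [if_neg hc2, List.getD_eq_getElem?_getD, List.getD_eq_getElem?_getD,
            List.getElem?_set_ne (by omega)]

theorem intercalate_lists_eq (lst1 lst2 : List Int) (h1 : lst1 ≠ []) (h2 : lst2 ≠ []) :
    intercalate_lists lst1 lst2 = intercalate_lists_alt lst1 lst2 := by
  have hn : 0 < lst1.length := List.length_pos_iff.mpr h1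
  have hm : 0 < lst2.length := List.length_pos_iff.mpr h2
  set n := lst1.length with hndef
  set m := lst2.length with hmdef
  set mx := if n > m then n else m with hmx
  have hmxn : n ≤ mx := by rw [hmx]; split <;> omega
  have hmxm : m ≤ mx := by rw [hmx]; split <;> omega
  have hsub1 : m - n = mx - n := by rw [hmx]; split <;> omega
  have hsub2 : n - m = mx - m := by rw [hmx]; split <;> omega
  set E1 := lst1 ++ List.replicate (mx - n) lst1.getLast! with hE1
  set E2 := lst2 ++ List.replicate (mx - m) lst2.getLast! with hE2
  have hE1len : E1.length = mx := by rw [hE1]; simp; omega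
  have hE2len : E2.length = mx := by rw [hE2]; simp; omega
  -- A's result is interleave E1 E2
  have hA : intercalate_lists lst1 lst2 = interleave E1 E2 := by
    simp only [intercalate_lists, List.nil_append]
    rw [padTo_eq, padTo_eq, ← hndef, ← hmdef, hsub1, hsub2, ← hE1, ← hE2,
      zipflat_eq_interleave, List.nil_append]
  rw [hA]
  -- B's result slot by slot
  unfold intercalate_lists_alt
  simp only [← hndef, ← hmdef, ← hmx]
  apply List.ext_getElem
  · rw [interleave_length E1 E2 (by omega), hE1len]
    simp [assignStride2_length]
  · intro i hiA hiB
    have hi : i < 2 * mx := by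
      rw [interleave_length E1 E2 (by omega), hE1len] at hiA; omega
    rw [← List.getD_eq_getElem _ 0 hiA, ← List.getD_eq_getElem _ 0 hiB]
    rw [interleave_getD E1 E2 i (by omega)]
    rw [assignStride2_getD _ _ _ _ (by simp [assignStride2_length]; omega)]
    rw [assignStride2_getD _ _ _ _ (by simp [assignStride2_length]; omega)]
    rw [assignStride2_getD _ _ _ _ (by simp [assignStride2_length]; omega)]
    rw [assignStride2_getD _ _ _ _ (by simp; omega)]
    simp only [List.length_replicate]
    by_cases hpar : i % 2 = 0
    · -- even slot: comes from lst1 / its padding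
      rw [if_pos hpar]
      have c4 : ¬ (2 * m + 1 ≤ i ∧ (i - (2 * m + 1)) % 2 = 0 ∧ (i - (2 * m + 1)) / 2 < mx - m) := by
        omega
      have c3 : ¬ (1 ≤ i ∧ (i - 1) % 2 = 0 ∧ (i - 1) / 2 < m) := by omega
      rw [if_neg c4, if_neg c3]
      by_cases hj : i / 2 < n
      · have c2 : ¬ (2 * n ≤ i ∧ (i - 2 * n) % 2 = 0 ∧ (i - 2 * n) / 2 < mx - n) := by omega
        have c1 : 0 ≤ i ∧ (i - 0) % 2 = 0 ∧ (i - 0) / 2 < n := by omega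
        rw [if_neg c2, if_pos c1]
        rw [hE1, List.getD_eq_getElem?_getD, List.getElem?_append_left (by omega),
          ← List.getD_eq_getElem?_getD]
        simp
      · have c2 : 2 * n ≤ i ∧ (i - 2 * n) % 2 = 0 ∧ (i - 2 * n) / 2 < mx - n := by omega
        rw [if_pos c2]
        rw [hE1, List.getD_eq_getElem?_getD, List.getElem?_append_right (by omega),
          List.getElem?_replicate]
        have hlt : i / 2 - lst1.length < mx - n := by omega
        rw [List.getD_eq_getElem?_getD, List.getElem?_replicate]
        rw [if_pos (show i / 2 - lst1.length < mx - n by omega),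
          if_pos (show (i - 2 * n) / 2 < mx - n from c2.2.2)]
    · -- odd slot: comes from lst2 / its padding
      rw [if_neg hpar]
      by_cases hj : i / 2 < m
      · have c4 : ¬ (2 * m + 1 ≤ i ∧ (i - (2 * m + 1)) % 2 = 0 ∧ (i - (2 * m + 1)) / 2 < mx - m) := by
          omega
        have c3 : 1 ≤ i ∧ (i - 1) % 2 = 0 ∧ (i - 1) / 2 < m := by omega
        rw [if_neg c4, if_pos c3]
        have : (i - 1) / 2 = i / 2 := by omega
        rw [this, hE2, List.getD_eq_getElem?_getD, List.getElem?_append_left (by omega),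
          ← List.getD_eq_getElem?_getD]
      · have c4 : 2 * m + 1 ≤ i ∧ (i - (2 * m + 1)) % 2 = 0 ∧ (i - (2 * m + 1)) / 2 < mx - m := by
          omega
        rw [if_pos c4]
        rw [hE2, List.getD_eq_getElem?_getD, List.getElem?_append_right (by omega),
          List.getElem?_replicate]
        have hlt : i / 2 - lst2.length < mx - m := by omega
        rw [List.getD_eq_getElem?_getD, List.getElem?_replicate]
        rw [if_pos (show i / 2 - lst2.length < mx - m by omega),
          if_pos (show (i - (2 * m + 1)) / 2 < mx - m from c4.2.2)]

-- ===== VERDICT (by name: the statement is the Claim_ definition above) =====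
theorem intercalate_lists_spec : Claim_equal_intercalate_lists := by
  intro lst1 lst2 _ hpre
  unfold Spec_intercalate_lists
  exact (intercalate_lists_eq lst1 lst2 hpre.1 hpre.2).symm ▸ rfl
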